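-- pv_equiv track=rewrite | github.com/m1sterzer0/JuliaAtcoder | python/abc170_179/abc174_Efast.py | solve
-- ===== SOURCE A (Python) =====
-- def solve(N,K,A) :
--     l = 0; u = max(A)
--     while u-l > 1 :
--         m = (u+l) >> 1
--         numcuts = 0
--         for a in A : numcuts += (a-1) // m
--         if numcuts <= K : u = m
--         else : l = m
--     return u
-- ===== SOURCE B (Python) =====
-- def solve(N, K, A):
--     mx = max(A)
--     m = 1
--     while m <= mx:
--         c = 0
--         nxt = mx
--         for a in A:
--             q = (a - 1) // m
--             c += q
--             if q > 0:
--                 nxt = min(nxt, (a - 1) // q)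
--         if c <= K:
--             return m
--         m = nxt + 1
--     return mx
-- ===== Notes on version B (the rewrite author's own statement) =====
-- stated objective: alternative
-- what changed: Replaces A's bracket-halving binary search by an ascending divisor-block scan: it walks candidate lengths upward, evaluates the cut count sum((a-1)//m) once per block of lengths on which that count is constant, jumps to the next block boundary, and returns the first valid length (falling back to max(A) when none is valid).
-- outside the precondition, e.g. on solve(4, -10, [-7, 9, -3, -9]): A returns 9, B returns 1; on solve(6, -2, [-5, -2, 0, 9, 4, 9]): A returns 9, B returns 5
import Mathlib
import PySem

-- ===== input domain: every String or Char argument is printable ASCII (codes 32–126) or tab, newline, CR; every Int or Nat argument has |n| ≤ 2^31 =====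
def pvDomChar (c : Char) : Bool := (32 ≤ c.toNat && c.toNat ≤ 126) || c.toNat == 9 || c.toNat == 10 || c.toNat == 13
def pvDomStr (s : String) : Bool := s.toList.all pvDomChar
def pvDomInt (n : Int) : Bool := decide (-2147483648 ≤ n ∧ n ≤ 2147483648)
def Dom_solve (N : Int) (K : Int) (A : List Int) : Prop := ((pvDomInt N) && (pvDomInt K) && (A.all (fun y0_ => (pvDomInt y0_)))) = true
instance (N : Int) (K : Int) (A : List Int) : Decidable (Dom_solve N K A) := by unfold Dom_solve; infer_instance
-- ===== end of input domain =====

-- B replaces A's binary search by an ascending divisor-block scan that returns the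
-- first valid segment length, jumping over blocks where the cut count is constant
-- (objective: alternative — a genuinely different algorithm, no speed claim).

-- ===== PORT A =====
-- the while loop of A, recursing on the shrinking bracket [l, u]
def solveLoop (K : Int) (A : List Int) (l u : Int) : Int :=
  if _h : u - l > 1 then
    -- Python 'm = (u+l) >> 1' is floor-division by 2, exact also on negatives
    let m := PySem.Int.floordiv (u + l) 2
    let numcuts := A.foldl (fun acc a => acc + PySem.Int.floordiv (a - 1) m) 0
    if numcuts ≤ K then solveLoop K A l m else solveLoop K A m u
  else u
termination_by (u - l).toNat
decreasing_by
  · have h1 : l + 1 ≤ PySem.Int.floordiv (u + l) 2 :=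
      (PySem.Int.le_floordiv_iff_mul_le (by norm_num)).mpr (by omega)
    have h2 : PySem.Int.floordiv (u + l) 2 < u :=
      (PySem.Int.floordiv_lt_iff_lt_mul (by norm_num)).mpr (by omega)
    omega
  · have h1 : l + 1 ≤ PySem.Int.floordiv (u + l) 2 :=
      (PySem.Int.le_floordiv_iff_mul_le (by norm_num)).mpr (by omega)
    have h2 : PySem.Int.floordiv (u + l) 2 < u :=
      (PySem.Int.floordiv_lt_iff_lt_mul (by norm_num)).mpr (by omega)
    omega

def solve (N : Int) (K : Int) (A : List Int) : Int :=
  solveLoop K A 0 ((PySem.List.max? A (fun x => x)).getD 0)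

-- ===== PORT B =====
-- Source B's 'while m <= mx' block scan.  The recursion argument 'max (p.2 + 1) (m + 1)'
-- is Python's 'nxt + 1' with a termination guard: for every start 1 ≤ m the jump
-- target nxt is ≥ m (blockLoop_pair_ge below), so the guard never alters the value
-- on any run that starts at m = 1 as solve_alt's does.
def blockLoop (K : Int) (A : List Int) (mx : Int) (m : Int) : Int :=
  if _h : m ≤ mx then
    let p := A.foldl (fun (p : Int × Int) a =>
      let q := PySem.Int.floordiv (a - 1) m
      (p.1 + q, if 0 < q then min p.2 (PySem.Int.floordiv (a - 1) q) else p.2)) (0, mx)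
    if p.1 ≤ K then m else blockLoop K A mx (max (p.2 + 1) (m + 1))
  else mx
termination_by (mx + 1 - m).toNat
decreasing_by omega

def solve_alt (N : Int) (K : Int) (A : List Int) : Int :=
  let mx := (PySem.List.max? A (fun x => x)).getD 0
  blockLoop K A mx 1

-- ===== PRECONDITION & SPEC =====
-- Pre_ excludes the empty list (A raises ValueError in max) and lists mixing a negative
-- entry with an entry above 1: there the cut-count is not monotone in the segment length
-- and A's binary-search answer is an accident of which midpoints it happens to probe.
def Pre_solve (N : Int) (K : Int) (A : List Int) : Prop :=
  A ≠ [] ∧ ((∀ a ∈ A, 0 ≤ a) ∨ (∀ a ∈ A, a ≤ 1))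
instance (N : Int) (K : Int) (A : List Int) : Decidable (Pre_solve N K A) := by unfold Pre_solve; infer_instance
def pvWitness_solve : Int × Int × List Int := (3, 2, [7, 4, 5])
def Spec_solve (N : Int) (K : Int) (A : List Int) (out : Int) : Prop := out = solve_alt N K A
instance (N : Int) (K : Int) (A : List Int) (out : Int) : Decidable (Spec_solve N K A out) := by unfold Spec_solve; infer_instance

-- ===== CLAIM (what is proved, stated in full; the proofs are below) =====
def Claim_equal_solve : Prop := ∀ (N : Int) (K : Int) (A : List Int), Dom_solve N K A → Pre_solve N K A → Spec_solve N K A (solve N K A)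

-- ===== LEMMAS AND PROOFS =====

-- the cut count both programs evaluate
def cuts (A : List Int) (m : Int) : Int :=
  A.foldl (fun acc a => acc + PySem.Int.floordiv (a - 1) m) 0

theorem cuts_foldl_shift (A : List Int) (m c : Int) :
    A.foldl (fun acc a => acc + PySem.Int.floordiv (a - 1) m) c = c + cuts A m := by
  induction A generalizing c with
  | nil => simp [cuts]
  | cons a A ih =>
      simp only [cuts, List.foldl_cons] at *
      rw [ih, ih (0 + _)]
      ring

theorem cuts_cons (a : Int) (A : List Int) (m : Int) :
    cuts (a :: A) m = PySem.Int.floordiv (a - 1) m + cuts A m := by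
  simp only [cuts, List.foldl_cons, zero_add]
  exact cuts_foldl_shift A m _

theorem term_antitone {a m m' : Int} (ha : 0 ≤ a) (hm : 0 < m) (hmm : m ≤ m') :
    PySem.Int.floordiv (a - 1) m' ≤ PySem.Int.floordiv (a - 1) m := by
  have hm' : (0 : Int) < m' := lt_of_lt_of_le hm hmm
  set q := PySem.Int.floordiv (a - 1) m' with hq
  have hqle : q * m' ≤ a - 1 ∧ a - 1 < (q + 1) * m' :=
    (PySem.Int.floordiv_eq_iff_of_pos hm').mp hq.symm
  have hqneg : -1 ≤ q := (PySem.Int.le_floordiv_iff_mul_le hm').mpr (by nlinarith)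
  refine (PySem.Int.le_floordiv_iff_mul_le hm).mpr ?_
  by_cases h0 : 0 ≤ q
  · calc q * m ≤ q * m' := by nlinarith
      _ ≤ a - 1 := hqle.1
  · have hq1 : q = -1 := by omega
    rw [hq1]
    omega

theorem cuts_antitone {A : List Int} {m m' : Int} (hA : ∀ a ∈ A, 0 ≤ a)
    (hm : 0 < m) (hmm : m ≤ m') : cuts A m' ≤ cuts A m := by
  induction A with
  | nil => simp [cuts]
  | cons a A ih =>
      rw [cuts_cons, cuts_cons]
      have h1 := term_antitone (hA a (by simp)) hm hmm
      have h2 := ih (fun x hx => hA x (by simp [hx]))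
      omega

-- one floor-division term is constant on the block [m, (a-1)//((a-1)//m)]
theorem term_const {a m m' : Int} (ha : 0 ≤ a) (hm : 1 ≤ m) (hmm : m ≤ m')
    (hq : 0 < PySem.Int.floordiv (a - 1) m →
      m' ≤ PySem.Int.floordiv (a - 1) (PySem.Int.floordiv (a - 1) m)) :
    PySem.Int.floordiv (a - 1) m' = PySem.Int.floordiv (a - 1) m := by
  have hm0 : (0 : Int) < m := by omega
  have hm'0 : (0 : Int) < m' := by omega
  set q := PySem.Int.floordiv (a - 1) m with hqdef
  have hchar : q * m ≤ a - 1 ∧ a - 1 < (q + 1) * m :=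
    (PySem.Int.floordiv_eq_iff_of_pos hm0).mp hqdef.symm
  by_cases hpos : 0 < q
  · have hbound := hq hpos
    have h1 : m' * q ≤ a - 1 := (PySem.Int.le_floordiv_iff_mul_le hpos).mp hbound
    refine (PySem.Int.floordiv_eq_iff_of_pos hm'0).mpr ⟨by nlinarith, ?_⟩
    calc a - 1 < (q + 1) * m := hchar.2
      _ ≤ (q + 1) * m' := by nlinarith
  · rcases eq_or_lt_of_le ha with ha0 | ha1
    · -- a = 0 : both sides are (-1) // m'' = -1
      have e : ∀ k : Int, 0 < k → PySem.Int.floordiv (0 - 1) k = -1 := fun k hk =>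
        (PySem.Int.floordiv_eq_iff_of_pos hk).mpr (by constructor <;> omega)
      rw [← ha0, e m' hm'0, hqdef, ← ha0, e m hm0]
    · -- a ≥ 1, q ≤ 0 forces q = 0, and a - 1 < m ≤ m'
      have hq0 : 0 ≤ q := (PySem.Int.le_floordiv_iff_mul_le hm0).mpr (by omega)
      have hqz : q = 0 := by omega
      rw [hqz] at hchar ⊢
      have hlt : a - 1 < m := by nlinarith [hchar.2]
      exact (PySem.Int.floordiv_eq_iff_of_pos hm'0).mpr ⟨by nlinarith, by nlinarith⟩

-- the second fold component of blockLoop's pass, on its own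
def nextB (A : List Int) (m : Int) (acc : Int) : Int :=
  A.foldl (fun acc a =>
    let q := PySem.Int.floordiv (a - 1) m
    if 0 < q then min acc (PySem.Int.floordiv (a - 1) q) else acc) acc

theorem blockLoop_pair (A : List Int) (m c x : Int) :
    A.foldl (fun (p : Int × Int) a =>
      let q := PySem.Int.floordiv (a - 1) m
      (p.1 + q, if 0 < q then min p.2 (PySem.Int.floordiv (a - 1) q) else p.2)) (c, x)
      = (c + cuts A m, nextB A m x) := by
  induction A generalizing c x with
  | nil => simp [cuts, nextB]
  | cons a A ih =>
      simp only [List.foldl_cons]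
      rw [ih]
      simp only [cuts_cons, Prod.mk.injEq]
      exact ⟨by ring, rfl⟩

theorem nextB_le (A : List Int) (m : Int) : ∀ acc, nextB A m acc ≤ acc := by
  induction A with
  | nil => intro acc; simp [nextB]
  | cons a A ih =>
      intro acc
      simp only [nextB, List.foldl_cons]
      by_cases hq : 0 < PySem.Int.floordiv (a - 1) m
      · simp only [if_pos hq]
        exact le_trans (ih _) (min_le_left _ _)
      · simp only [if_neg hq]
        exact ih acc

theorem nextB_ge (A : List Int) {m : Int} (hm : 1 ≤ m) :
    ∀ acc, m ≤ acc → m ≤ nextB A m acc := by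
  induction A with
  | nil => intro acc h; simpa [nextB] using h
  | cons a A ih =>
      intro acc hacc
      simp only [nextB, List.foldl_cons]
      by_cases hq : 0 < PySem.Int.floordiv (a - 1) m
      · simp only [if_pos hq]
        refine ih _ (le_min hacc ?_)
        refine (PySem.Int.le_floordiv_iff_mul_le hq).mpr ?_
        have := (PySem.Int.le_floordiv_iff_mul_le (show (0:Int) < m by omega)).mp
          (le_refl (PySem.Int.floordiv (a - 1) m))
        nlinarith
      · simp only [if_neg hq]
        exact ih acc hacc

-- the cut count is constant on the whole block [m, nextB A m acc]
theorem cuts_const {A : List Int} (hA : ∀ a ∈ A, 0 ≤ a) {m : Int} (hm : 1 ≤ m) :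
    ∀ acc m', m ≤ m' → m' ≤ nextB A m acc → cuts A m' = cuts A m := by
  induction A with
  | nil => intro acc m' _ _; simp [cuts]
  | cons a A ih =>
      intro acc m' h1 h2
      simp only [nextB, List.foldl_cons] at h2
      have htail : cuts A m' = cuts A m :=
        ih (fun x hx => hA x (by simp [hx])) _ m' h1 h2
      have hacc' : m' ≤ (if 0 < PySem.Int.floordiv (a - 1) m
          then min acc (PySem.Int.floordiv (a - 1) (PySem.Int.floordiv (a - 1) m))
          else acc) := le_trans h2 (nextB_le A m _)
      have hhead : PySem.Int.floordiv (a - 1) m' = PySem.Int.floordiv (a - 1) m := by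
        refine term_const (hA a (by simp)) hm h1 ?_
        intro hq
        rw [if_pos hq] at hacc'
        exact le_trans hacc' (min_le_right _ _)
      rw [cuts_cons, cuts_cons, hhead, htail]

-- binary-search loop: when some valid length t lies in the bracket, the loop finds it
theorem solveLoop_finds (K : Int) (A : List Int) (hA : ∀ a ∈ A, 0 ≤ a) (t : Int)
    (ht0 : 0 < t) (htP : cuts A t ≤ K) (htmin : ∀ m, 0 < m → m < t → ¬ cuts A m ≤ K) :
    ∀ l u, 0 ≤ l → l < u → l < t → t ≤ u → solveLoop K A l u = t := by
  intro l u
  induction hn : (u - l).toNat using Nat.strong_induction_on generalizing l u with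
  | _ n ih =>
    intro hl0 hlu hlt htu
    rw [solveLoop]
    by_cases hc : u - l > 1
    · simp only [dif_pos hc]
      have h1 : l + 1 ≤ PySem.Int.floordiv (u + l) 2 :=
        (PySem.Int.le_floordiv_iff_mul_le (by norm_num)).mpr (by omega)
      have h2 : PySem.Int.floordiv (u + l) 2 < u :=
        (PySem.Int.floordiv_lt_iff_lt_mul (by norm_num)).mpr (by omega)
      set m := PySem.Int.floordiv (u + l) 2 with hm
      have hcuts : A.foldl (fun acc a => acc + PySem.Int.floordiv (a - 1) m) 0 = cuts A m := rfl
      rw [hcuts]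
      by_cases hP : cuts A m ≤ K
      · rw [if_pos hP]
        have htm : t ≤ m := by
          by_contra h
          exact htmin m (by omega) (by omega) hP
        exact ih (m - l).toNat (by omega) l m rfl hl0 (by omega) hlt htm
      · rw [if_neg hP]
        have hmt : m < t := by
          by_contra h
          exact hP (le_trans (cuts_antitone hA ht0 (by omega)) htP)
        exact ih (u - m).toNat (by omega) m u rfl (by omega) (by omega) hmt htu
    · simp only [dif_neg hc]
      omega

-- binary-search loop: when no length in the open bracket is valid, u never moves
theorem solveLoop_stuck (K : Int) (A : List Int) :
    ∀ l u, (∀ m, l < m → m < u → ¬ cuts A m ≤ K) → solveLoop K A l u = u := by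
  intro l u
  induction hn : (u - l).toNat using Nat.strong_induction_on generalizing l u with
  | _ n ih =>
    intro hno
    rw [solveLoop]
    by_cases hc : u - l > 1
    · simp only [dif_pos hc]
      have h1 : l + 1 ≤ PySem.Int.floordiv (u + l) 2 :=
        (PySem.Int.le_floordiv_iff_mul_le (by norm_num)).mpr (by omega)
      have h2 : PySem.Int.floordiv (u + l) 2 < u :=
        (PySem.Int.floordiv_lt_iff_lt_mul (by norm_num)).mpr (by omega)
      set m := PySem.Int.floordiv (u + l) 2 with hm
      have hcuts : A.foldl (fun acc a => acc + PySem.Int.floordiv (a - 1) m) 0 = cuts A m := rfl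
      rw [hcuts, if_neg (hno m (by omega) (by omega))]
      exact ih (u - m).toNat (by omega) m u rfl (fun x hx hx' => hno x (by omega) hx')
    · simp only [dif_neg hc]

-- block scan: it stops exactly at the least valid length t
theorem blockLoop_finds (K : Int) (A : List Int) (hA : ∀ a ∈ A, 0 ≤ a) (mx t : Int)
    (ht1 : 1 ≤ t) (htmx : t ≤ mx) (htP : cuts A t ≤ K)
    (htmin : ∀ j, 1 ≤ j → j < t → ¬ cuts A j ≤ K) :
    ∀ m, 1 ≤ m → m ≤ t → blockLoop K A mx m = t := by
  intro m
  induction hn : (t - m).toNat using Nat.strong_induction_on generalizing m with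
  | _ n ih =>
    intro hm1 hmt
    rw [blockLoop, dif_pos (by omega), blockLoop_pair]
    simp only [zero_add]
    by_cases hP : cuts A m ≤ K
    · rw [if_pos hP]
      by_contra hne
      exact htmin m hm1 (by omega) hP
    · rw [if_neg hP]
      have hmx : m ≤ nextB A m mx := nextB_ge A hm1 mx (by omega)
      have hnt : nextB A m mx < t := by
        by_contra h
        exact hP (by rw [← cuts_const hA hm1 mx t (by omega) (by omega)]; exact htP)
      have hmax : max (nextB A m mx + 1) (m + 1) = nextB A m mx + 1 := by omega
      rw [hmax]
      exact ih (t - (nextB A m mx + 1)).toNat (by omega) _ rfl (by omega) (by omega)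

-- block scan: when no length in [1, mx] is valid it falls through to mx
theorem blockLoop_stuck (K : Int) (A : List Int) (mx : Int)
    (hno : ∀ j, 1 ≤ j → j ≤ mx → ¬ cuts A j ≤ K) :
    ∀ m, 1 ≤ m → blockLoop K A mx m = mx := by
  intro m
  induction hn : (mx + 1 - m).toNat using Nat.strong_induction_on generalizing m with
  | _ n ih =>
    intro hm1
    rw [blockLoop]
    by_cases hc : m ≤ mx
    · rw [dif_pos hc, blockLoop_pair]
      simp only [zero_add]
      rw [if_neg (hno m hm1 hc)]
      exact ih (mx + 1 - max (nextB A m mx + 1) (m + 1)).toNat (by omega) _ rfl (by omega)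
    · rw [dif_neg hc]

-- ===== VERDICT (by name: the statement is the Claim_ definition above) =====
theorem solve_spec : Claim_equal_solve := by
  intro N K A _hDom hPre
  obtain ⟨hne, hcase⟩ := hPre
  unfold Spec_solve solve solve_alt
  obtain ⟨mx, hmx⟩ : ∃ mx, PySem.List.max? A (fun x => x) = some mx := by
    cases h : PySem.List.max? A (fun x => x) with
    | none => exact absurd ((PySem.List.max?_eq_none_iff A _).mp h) hne
    | some m => exact ⟨m, rfl⟩
  rw [hmx]
  simp only [Option.getD_some]
  have hmem : mx ∈ A := PySem.List.max?_mem hmx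
  have hmax : ∀ y ∈ A, y ≤ mx := PySem.List.max?_isMax hmx
  rcases hcase with hpos | hle1
  · -- all entries nonnegative: the cut count is antitone in the length
    have hmx0 : 0 ≤ mx := hpos mx hmem
    rcases eq_or_lt_of_le hmx0 with h0 | h0
    · -- mx = 0 : A's loop never runs, B's scan has no iteration
      rw [solveLoop, dif_neg (by omega), blockLoop, dif_neg (by omega)]
    · by_cases hPmx : cuts A mx ≤ K
      · -- some valid length exists; both return the least one
        have hex : ∃ n : ℕ, cuts A ((n : Int) + 1) ≤ K := by
          refine ⟨(mx - 1).toNat, ?_⟩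
          have : ((mx - 1).toNat : Int) + 1 = mx := by omega
          rwa [this]
        set tn := Nat.find hex with htn
        set t : Int := (tn : Int) + 1 with ht
        have ht0 : 0 < t := by positivity
        have htP : cuts A t ≤ K := Nat.find_spec hex
        have htmin : ∀ m, 0 < m → m < t → ¬ cuts A m ≤ K := by
          intro m hm hmt hc
          have hmn : ((m - 1).toNat : Int) + 1 = m := by omega
          have : (m - 1).toNat < tn := by omega
          exact Nat.find_min hex this (by rwa [hmn])
        have htmx : t ≤ mx := by
          have : tn ≤ (mx - 1).toNat := Nat.find_le (by
            have : ((mx - 1).toNat : Int) + 1 = mx := by omega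
            rwa [this])
          omega
        rw [solveLoop_finds K A hpos t ht0 htP htmin 0 mx (by omega) (by omega) (by omega) htmx,
          blockLoop_finds K A hpos mx t (by omega) htmx htP
            (fun j hj hj' => htmin j (by omega) hj') 1 le_rfl (by omega)]
      · -- no valid length at all: A keeps u = mx, B's scan falls through to mx
        have hnone : ∀ m, 0 < m → m ≤ mx → ¬ cuts A m ≤ K := fun m hm hm' hc =>
          hPmx (le_trans (cuts_antitone hpos hm hm') hc)
        rw [solveLoop_stuck K A 0 mx (fun m hm hm' => hnone m hm (by omega)),
          blockLoop_stuck K A mx (fun j hj hj' => hnone j (by omega) hj') 1 le_rfl]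
  · -- all entries ≤ 1: mx ≤ 1, A's loop never runs and B's scan returns mx directly
    have hmx1 : mx ≤ 1 := hle1 mx hmem
    rw [solveLoop, dif_neg (by omega)]
    by_cases h1 : mx < 1
    · rw [blockLoop, dif_neg (by omega)]
    · have hmxe : mx = 1 := by omega
      subst hmxe
      rw [blockLoop, dif_pos le_rfl, blockLoop_pair]
      simp only [zero_add]
      by_cases hP : cuts A 1 ≤ K
      · rw [if_pos hP]
      · rw [if_neg hP, blockLoop, dif_neg (by omega)]
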